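-- pv_equiv track=rewrite | github.com/Yoshito924/AI-transcription | src/api_utils.py | _rank_models_by_priority
-- ===== SOURCE A (Python) =====
-- def _rank_models_by_priority(available_models):
--     """利用可能なモデルを優先順位でランク付け（音声処理用）
--
--     優先順位:
--     1. flash-preview-XX-2025 (最新日付、ProとLiveは除外)
--     2. flash-lite 系（最軽量）
--     3. flash 系安定版（プレビュー・Lite以外）
--     4. その他（Proは最後）
--
--     除外: Pro系、Live系、TTS系、Thinking系（音声処理には重すぎる/特殊用途）
--     """
--     # Pro系、Live系、TTS系、Thinking系を除外
--     exclude_keywords = ['pro', 'live', '-tts', 'thinking']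
--     filtered_models = [
--         m for m in available_models
--         if not any(kw in m.lower() for kw in exclude_keywords)
--     ]
--
--     # 優先度グループを定義: (フィルタ関数, 説明)
--     priority_groups = [
--         lambda m, ranked: 'flash' in m.lower() and 'preview' in m.lower(),
--         lambda m, ranked: 'flash-lite' in m.lower() and m not in ranked,
--         lambda m, ranked: 'flash' in m.lower() and 'lite' not in m.lower() and 'preview' not in m.lower() and m not in ranked,
--     ]
--
--     ranked = []
--     for group_filter in priority_groups:
--         matches = [m for m in filtered_models if group_filter(m, ranked)]
--         matches.sort(reverse=True)
--         ranked.extend(matches)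
--
--     # その他のGeminiモデル（上記に含まれないもの）
--     ranked.extend(m for m in filtered_models if m not in ranked)
--
--     return ranked
-- ===== SOURCE B (Python) =====
-- def _rank_models_by_priority(available_models):
--     """Single-pass bucket classification (cascade in priority order), then
--     reverse-sort buckets 0-2; bucket 3 keeps first occurrences in order."""
--     exclude_keywords = ('pro', 'live', '-tts', 'thinking')
--     b0, b1, b2, b3 = [], [], [], []
--     seen_other = set()
--     for m in available_models:
--         ml = m.lower()
--         if any(kw in ml for kw in exclude_keywords):
--             continue
--         flash = 'flash' in ml
--         if flash and 'preview' in ml: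
--             b0.append(m)
--         elif 'flash-lite' in ml:
--             b1.append(m)
--         elif flash and 'lite' not in ml:
--             b2.append(m)
--         elif m not in seen_other:
--             seen_other.add(m)
--             b3.append(m)
--     return (sorted(b0, reverse=True) + sorted(b1, reverse=True)
--             + sorted(b2, reverse=True) + b3)
-- ===== Notes on version B (the rewrite author's own statement) =====
-- stated objective: faster
-- what changed: Replaces A's three separate filter-sort-extend passes over filtered_models plus a lazy `m not in ranked` cross-pass list-membership dedup with a single classifying pass (if/elif cascade in priority order) into four bucket lists and a seen-set for the leftover bucket, sorting only the first three buckets at the end.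
import Mathlib
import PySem

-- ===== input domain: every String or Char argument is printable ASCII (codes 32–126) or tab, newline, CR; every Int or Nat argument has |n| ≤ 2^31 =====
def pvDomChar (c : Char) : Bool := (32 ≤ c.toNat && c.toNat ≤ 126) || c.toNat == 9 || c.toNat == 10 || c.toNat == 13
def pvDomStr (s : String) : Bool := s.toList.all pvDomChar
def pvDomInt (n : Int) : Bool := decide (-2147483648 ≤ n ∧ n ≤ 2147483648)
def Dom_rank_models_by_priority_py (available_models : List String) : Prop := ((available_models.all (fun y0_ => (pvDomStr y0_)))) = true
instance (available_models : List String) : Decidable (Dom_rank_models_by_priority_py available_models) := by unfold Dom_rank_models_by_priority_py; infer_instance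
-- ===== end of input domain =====

-- B makes one classifying pass into four buckets (seen-set dedup for the leftover bucket) instead
-- of A's three filtered passes with `not in ranked` list scans (objective: faster, as measured).

-- ===== PORT A =====
-- A, literally: filter out excluded models, three priority-group passes (each a filter over
-- filtered_models, reverse-sorted, extended onto `ranked`), then a lazy dedup extend of the rest.
def rank_models_by_priority_py (available_models : List String) : List String :=
  let filtered_models := available_models.filter (fun m =>
    !(["pro", "live", "-tts", "thinking"].any (fun kw => PySem.Str.isIn kw (PySem.Str.lower m))))
  let priority_groups : List (String → List String → Bool) :=
    [ fun m _ => PySem.Str.isIn "flash" (PySem.Str.lower m) && PySem.Str.isIn "preview" (PySem.Str.lower m),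
      fun m ranked => PySem.Str.isIn "flash-lite" (PySem.Str.lower m) && !(ranked.contains m),
      fun m ranked => PySem.Str.isIn "flash" (PySem.Str.lower m) && !(PySem.Str.isIn "lite" (PySem.Str.lower m))
        && !(PySem.Str.isIn "preview" (PySem.Str.lower m)) && !(ranked.contains m) ]
  let ranked := priority_groups.foldl (fun ranked group_filter =>
    ranked ++ PySem.List.sorted (filtered_models.filter (fun m => group_filter m ranked)) (fun x => x) true) []
  -- `ranked.extend(m for m in filtered_models if m not in ranked)`: the generator is consumed
  -- lazily, so `ranked` grows while it is tested — a fold appending each not-yet-present m.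
  filtered_models.foldl (fun ranked m => if ranked.contains m then ranked else ranked ++ [m]) ranked

-- ===== PORT B =====
-- B-side helper: the loop body of B's single classifying pass.
def rk_step (st : List String × List String × List String × List String × PySem.Set String)
    (m : String) : List String × List String × List String × List String × PySem.Set String :=
  let (b0, b1, b2, b3, seen) := st
  let ml := PySem.Str.lower m
  if ["pro", "live", "-tts", "thinking"].any (fun kw => PySem.Str.isIn kw ml) then st
  else
    let flash := PySem.Str.isIn "flash" ml
    if flash && PySem.Str.isIn "preview" ml then (b0 ++ [m], b1, b2, b3, seen)
    else if PySem.Str.isIn "flash-lite" ml then (b0, b1 ++ [m], b2, b3, seen)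
    else if flash && !(PySem.Str.isIn "lite" ml) then (b0, b1, b2 ++ [m], b3, seen)
    else if !(PySem.Set.contains seen m) then (b0, b1, b2, b3 ++ [m], PySem.Set.add seen m)
    else st

def rank_models_by_priority_py_alt (available_models : List String) : List String :=
  let st := available_models.foldl rk_step ([], [], [], [], PySem.Set.empty)
  PySem.List.sorted st.1 (fun x => x) true ++ PySem.List.sorted st.2.1 (fun x => x) true
    ++ PySem.List.sorted st.2.2.1 (fun x => x) true ++ st.2.2.2.1

-- ===== PRECONDITION & SPEC =====
def Spec_rank_models_by_priority_py (available_models : List String) (out : List String) : Prop := out = rank_models_by_priority_py_alt available_models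
instance (available_models : List String) (out : List String) : Decidable (Spec_rank_models_by_priority_py available_models out) := by unfold Spec_rank_models_by_priority_py; infer_instance

-- ===== CLAIM (what is proved, stated in full; the proofs are below) =====
def Claim_equal_rank_models_by_priority_py : Prop := ∀ (available_models : List String), Dom_rank_models_by_priority_py available_models → Spec_rank_models_by_priority_py available_models (rank_models_by_priority_py available_models)

-- ===== LEMMAS AND PROOFS =====

-- Atoms of the two programs' predicates (proof abbreviations only).
def pvKeep (m : String) : Bool :=
  !(["pro", "live", "-tts", "thinking"].any (fun kw => PySem.Str.isIn kw (PySem.Str.lower m)))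
def pvA0 (m : String) : Bool := PySem.Str.isIn "flash" (PySem.Str.lower m) && PySem.Str.isIn "preview" (PySem.Str.lower m)
def pvC1 (m : String) : Bool := !(pvA0 m) && PySem.Str.isIn "flash-lite" (PySem.Str.lower m)
def pvC2 (m : String) : Bool := !(pvA0 m) && !(PySem.Str.isIn "flash-lite" (PySem.Str.lower m))
  && (PySem.Str.isIn "flash" (PySem.Str.lower m) && !(PySem.Str.isIn "lite" (PySem.Str.lower m)))
def pvCO (m : String) : Bool := !(pvA0 m) && !(PySem.Str.isIn "flash-lite" (PySem.Str.lower m))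
  && !(PySem.Str.isIn "flash" (PySem.Str.lower m) && !(PySem.Str.isIn "lite" (PySem.Str.lower m)))
def pvDStep (acc : List String) (m : String) : List String :=
  if acc.contains m then acc else acc ++ [m]

-- rk_step, case by case, phrased with the atoms above.
theorem pv_rk_step_skip {m : String} (h : pvKeep m = false)
    (st : List String × List String × List String × List String × PySem.Set String) :
    rk_step st m = st := by
  obtain ⟨b0, b1, b2, b3, seen⟩ := st
  simp only [pvKeep, Bool.not_eq_false'] at h
  simp only [rk_step]
  rw [if_pos h]

theorem pv_rk_step_b0 {m : String} (hk : pvKeep m = true) (h0 : pvA0 m = true)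
    (b0 b1 b2 b3 : List String) (seen : PySem.Set String) :
    rk_step (b0, b1, b2, b3, seen) m = (b0 ++ [m], b1, b2, b3, seen) := by
  simp only [pvKeep, Bool.not_eq_true'] at hk
  simp only [pvA0] at h0
  simp only [rk_step]
  rw [if_neg (by rw [hk]; simp), if_pos h0]

theorem pv_rk_step_b1 {m : String} (hk : pvKeep m = true) (h1 : pvC1 m = true)
    (b0 b1 b2 b3 : List String) (seen : PySem.Set String) :
    rk_step (b0, b1, b2, b3, seen) m = (b0, b1 ++ [m], b2, b3, seen) := by
  simp only [pvKeep, Bool.not_eq_true'] at hk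
  simp only [pvC1, Bool.and_eq_true, Bool.not_eq_true'] at h1
  have h0 := h1.1
  simp only [pvA0] at h0
  simp only [rk_step]
  rw [if_neg (by rw [hk]; simp), if_neg (by rw [h0]; simp), if_pos h1.2]

theorem pv_rk_step_b2 {m : String} (hk : pvKeep m = true) (h2 : pvC2 m = true)
    (b0 b1 b2 b3 : List String) (seen : PySem.Set String) :
    rk_step (b0, b1, b2, b3, seen) m = (b0, b1, b2 ++ [m], b3, seen) := by
  simp only [pvKeep, Bool.not_eq_true'] at hk
  simp only [pvC2, Bool.and_eq_true, Bool.not_eq_true'] at h2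
  have h0 := h2.1.1
  simp only [pvA0] at h0
  simp only [rk_step]
  rw [if_neg (by rw [hk]; simp), if_neg (by rw [h0]; simp), if_neg (by rw [h2.1.2]; simp),
    if_pos (by rw [h2.2.1, h2.2.2]; rfl)]

theorem pv_rk_step_b3 {m : String} (hk : pvKeep m = true) (hO : pvCO m = true)
    (b0 b1 b2 b3 : List String) (seen : PySem.Set String) :
    rk_step (b0, b1, b2, b3, seen) m =
      if PySem.Set.contains seen m then (b0, b1, b2, b3, seen)
      else (b0, b1, b2, b3 ++ [m], PySem.Set.add seen m) := by
  simp only [pvKeep, Bool.not_eq_true'] at hk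
  simp only [pvCO, Bool.and_eq_true, Bool.not_eq_true'] at hO
  have h0 := hO.1.1
  simp only [pvA0] at h0
  simp only [rk_step]
  rw [if_neg (by rw [hk]; simp), if_neg (by rw [h0]; simp), if_neg (by rw [hO.1.2]; simp),
    if_neg (by rw [hO.2]; simp)]
  cases hc : PySem.Set.contains seen m <;> simp

theorem pv_foldB (l : List String) (b0 b1 b2 b3 : List String) :
    l.foldl rk_step (b0, b1, b2, b3, (b3 : PySem.Set String)) =
      (b0 ++ (l.filter pvKeep).filter pvA0,
       b1 ++ (l.filter pvKeep).filter pvC1,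
       b2 ++ (l.filter pvKeep).filter pvC2,
       ((l.filter pvKeep).filter pvCO).foldl pvDStep b3,
       (((l.filter pvKeep).filter pvCO).foldl pvDStep b3 : PySem.Set String)) := by
  induction l generalizing b0 b1 b2 b3 with
  | nil => simp
  | cons m l ih =>
    rw [List.foldl_cons, List.filter_cons]
    by_cases hk : pvKeep m = true
    · rw [if_pos hk, List.filter_cons, List.filter_cons, List.filter_cons, List.filter_cons]
      by_cases h0 : pvA0 m = true
      · have e1 : pvC1 m = false := by simp [pvC1, h0]
        have e2 : pvC2 m = false := by simp [pvC2, h0]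
        have eO : pvCO m = false := by simp [pvCO, h0]
        rw [pv_rk_step_b0 hk h0, ih]
        simp [h0, e1, e2, eO]
      · have e0 : pvA0 m = false := by simpa using h0
        by_cases h1 : pvC1 m = true
        · have hfl : PySem.Chars.isIn ['f','l','a','s','h','-','l','i','t','e'] (PySem.Chars.lower m.toList) = true := by
            have := h1; simp [pvC1] at this; exact this.2
          have e2 : pvC2 m = false := by simp [pvC2, hfl]
          have eO : pvCO m = false := by simp [pvCO, hfl]
          rw [pv_rk_step_b1 hk h1, ih]
          simp [e0, h1, e2, eO]
        · have e1 : pvC1 m = false := by simpa using h1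
          by_cases h2 : pvC2 m = true
          · have hatoms := h2
            simp [pvC2] at hatoms
            have eO : pvCO m = false := by simp [pvCO, hatoms.2.1, hatoms.2.2]
            rw [pv_rk_step_b2 hk h2, ih]
            simp [e0, e1, h2, eO]
          · have e2 : pvC2 m = false := by simpa using h2
            have eO : pvCO m = true := by
              simp only [pvC1] at e1
              simp only [pvC2] at e2
              simp only [pvCO, Bool.and_eq_true, Bool.not_eq_true']
              by_cases hfl : PySem.Str.isIn "flash-lite" (PySem.Str.lower m) = true
              · exact absurd hfl (by simpa [e0] using e1)
              · refine ⟨⟨e0, by simpa using hfl⟩, ?_⟩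
                simpa [e0, (by simpa using hfl : _)] using e2
            rw [pv_rk_step_b3 hk eO]
            by_cases hc : m ∈ b3
            · have hcc : PySem.Set.contains (b3 : PySem.Set String) m = true :=
                (PySem.Set.contains_iff _ _).mpr hc
              rw [if_pos hcc, ih]
              have hstep : pvDStep b3 m = b3 := by
                simp [pvDStep, hc]
              simp [e0, e1, e2, eO, hstep]
            · have hcc : PySem.Set.contains (b3 : PySem.Set String) m = false := by
                simpa using fun hh => hc ((PySem.Set.contains_iff _ _).mp hh)
              rw [if_neg (by simpa using hc), PySem.Set.add_of_not_mem hc, ih]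
              have hstep : pvDStep b3 m = b3 ++ [m] := by
                simp [pvDStep, hc]
              simp [e0, e1, e2, eO, hstep]
    · have hk' : pvKeep m = false := by simpa using hk
      rw [if_neg (by simp [hk']), pv_rk_step_skip hk', ih]

theorem pv_dedup_split (q : String → Bool) (l S d : List String)
    (h : ∀ m ∈ l, (m ∈ S ↔ q m = false)) :
    l.foldl pvDStep (S ++ d) = S ++ (l.filter q).foldl pvDStep d := by
  induction l generalizing d with
  | nil => simp
  | cons m l ih =>
    have hrest : ∀ x ∈ l, (x ∈ S ↔ q x = false) := fun x hx => h x (List.mem_cons_of_mem _ hx)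
    rw [List.foldl_cons, List.filter_cons]
    by_cases hq : q m = true
    · have hS : m ∉ S := fun hmS => by simp [(h m List.mem_cons_self).mp hmS] at hq
      have hstep : pvDStep (S ++ d) m = S ++ pvDStep d m := by
        by_cases hd : m ∈ d
        · simp [pvDStep, hd]
        · simp [pvDStep, hd, hS, List.append_assoc]
      rw [hstep, if_pos hq, List.foldl_cons]
      exact ih _ hrest
    · have hS : m ∈ S := (h m List.mem_cons_self).mpr (by simpa using hq)
      have hstep : pvDStep (S ++ d) m = S ++ d := by
        simp [pvDStep, hS]
      rw [hstep, if_neg (by simp [hq])]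
      exact ih _ hrest

-- Boolean facts relating A's predicates (with the `not in ranked` membership resolved) to B's cascade.
theorem pv_bool2 (f p fl li : Bool) :
    (f && !li && !p && !((f && p) || (!(f && p) && fl))) = (!(f && p) && !fl && (f && !li)) := by
  revert f p fl li; decide

theorem pv_bool3 (f p fl li : Bool) :
    ((f && p) = true ∨ (!(f && p) && fl) = true ∨ (!(f && p) && !fl && (f && !li)) = true) ↔
      (!(f && p) && !fl && !(f && !li)) = false := by
  revert f p fl li; decide

theorem pv_main (l : List String) :
    rank_models_by_priority_py l = rank_models_by_priority_py_alt l := by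
  unfold rank_models_by_priority_py rank_models_by_priority_py_alt
  rw [show (PySem.Set.empty : PySem.Set String) = ([] : List String) from rfl, pv_foldB l [] [] [] []]
  simp only [List.foldl_cons, List.foldl_nil, List.nil_append]
  have hfl : l.filter (fun m =>
      !(["pro", "live", "-tts", "thinking"].any (fun kw => PySem.Str.isIn kw (PySem.Str.lower m))))
      = l.filter pvKeep := rfl
  rw [hfl]
  set fl := l.filter pvKeep with hfldef
  rw [show (fun m => PySem.Str.isIn "flash" (PySem.Str.lower m)
        && PySem.Str.isIn "preview" (PySem.Str.lower m)) = pvA0 from rfl]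
  set S0 := PySem.List.sorted (fl.filter pvA0) (fun x => x) true with hS0
  -- membership in a reverse-sorted filtered bucket, for m ∈ fl
  have hmemS0 : ∀ m ∈ fl, (m ∈ S0 ↔ pvA0 m = true) := by
    intro m hm
    simp [hS0, PySem.List.mem_sorted, List.mem_filter, hm]
  -- group 1's filter equals B's bucket-1 predicate
  have key1 : fl.filter (fun m => PySem.Str.isIn "flash-lite" (PySem.Str.lower m) && !(S0.contains m))
      = fl.filter pvC1 := by
    apply List.filter_congr
    intro m hm
    have hcont : S0.contains m = pvA0 m := by
      cases h : pvA0 m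
      · simp [(hmemS0 m hm), h]
      · simp [(hmemS0 m hm), h]
    rw [hcont]
    simp [pvC1, Bool.and_comm]
  rw [key1]
  set S1 := PySem.List.sorted (fl.filter pvC1) (fun x => x) true with hS1
  have hmemS1 : ∀ m ∈ fl, (m ∈ S1 ↔ pvC1 m = true) := by
    intro m hm
    simp [hS1, PySem.List.mem_sorted, List.mem_filter, hm]
  -- group 2's filter equals B's bucket-2 predicate
  have key2 : fl.filter (fun m => PySem.Str.isIn "flash" (PySem.Str.lower m)
        && !(PySem.Str.isIn "lite" (PySem.Str.lower m))
        && !(PySem.Str.isIn "preview" (PySem.Str.lower m)) && !((S0 ++ S1).contains m))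
      = fl.filter pvC2 := by
    apply List.filter_congr
    intro m hm
    have hcont : (S0 ++ S1).contains m = (pvA0 m || pvC1 m) := by
      cases h0 : pvA0 m
      · cases h1 : pvC1 m
        · simp [hmemS0 m hm, hmemS1 m hm, h0, h1]
        · simp [hmemS1 m hm, h1]
      · simp [hmemS0 m hm, h0]
    rw [hcont]
    simp only [pvC1, pvA0, pvC2]
    generalize PySem.Str.isIn "flash" (PySem.Str.lower m) = f
    generalize PySem.Str.isIn "preview" (PySem.Str.lower m) = p
    generalize PySem.Str.isIn "flash-lite" (PySem.Str.lower m) = fli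
    generalize PySem.Str.isIn "lite" (PySem.Str.lower m) = li
    exact pv_bool2 f p fli li
  rw [key2]
  set S2 := PySem.List.sorted (fl.filter pvC2) (fun x => x) true with hS2
  have hmemS2 : ∀ m ∈ fl, (m ∈ S2 ↔ pvC2 m = true) := by
    intro m hm
    simp [hS2, PySem.List.mem_sorted, List.mem_filter, hm]
  -- the trailing lazy-dedup extend, split off the already ranked part
  have hstep : (fun (ranked : List String) m => if ranked.contains m then ranked else ranked ++ [m])
      = pvDStep := rfl
  rw [hstep]
  have hsplit : fl.foldl pvDStep (S0 ++ S1 ++ S2) =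
      (S0 ++ S1 ++ S2) ++ (fl.filter pvCO).foldl pvDStep [] := by
    rw [show S0 ++ S1 ++ S2 ++ (fl.filter pvCO).foldl pvDStep []
        = (S0 ++ S1 ++ S2) ++ (fl.filter pvCO).foldl pvDStep [] from rfl]
    rw [show fl.foldl pvDStep (S0 ++ S1 ++ S2)
        = fl.foldl pvDStep ((S0 ++ S1 ++ S2) ++ []) from by rw [List.append_nil]]
    apply pv_dedup_split
    intro m hm
    have : m ∈ S0 ++ S1 ++ S2 ↔ (pvA0 m = true ∨ pvC1 m = true ∨ pvC2 m = true) := by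
      simp [List.mem_append, hmemS0 m hm, hmemS1 m hm, hmemS2 m hm]
    rw [this]
    simp only [pvC1, pvA0, pvC2, pvCO]
    generalize PySem.Str.isIn "flash" (PySem.Str.lower m) = f
    generalize PySem.Str.isIn "preview" (PySem.Str.lower m) = p
    generalize PySem.Str.isIn "flash-lite" (PySem.Str.lower m) = fli
    generalize PySem.Str.isIn "lite" (PySem.Str.lower m) = li
    exact pv_bool3 f p fli li
  rw [hsplit]

-- ===== VERDICT (by name: the statement is the Claim_ definition above) =====
theorem rank_models_by_priority_py_spec : Claim_equal_rank_models_by_priority_py := by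
  intro l _
  exact pv_main l
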